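-- pv_equiv track=rewrite | github.com/Tosaaaki/QuantRabbit | tools/session_data.py | _multi_vehicle_reason
-- ===== SOURCE A (Python) =====
-- PAIR_CURRENCIES = {
--     "USD_JPY": ("USD", "JPY"),
--     "EUR_USD": ("EUR", "USD"),
--     "GBP_USD": ("GBP", "USD"),
--     "AUD_USD": ("AUD", "USD"),
--     "EUR_JPY": ("EUR", "JPY"),
--     "GBP_JPY": ("GBP", "JPY"),
--     "AUD_JPY": ("AUD", "JPY"),
-- }
--
-- def _multi_vehicle_reason(profile: dict, prior: list[dict]) -> str:
--     pair = str(profile.get("pair", ""))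
--     base, quote = PAIR_CURRENCIES.get(pair, ("?", "?"))
--     seat_family = str(profile.get("seat_family") or "seat")
--     if not prior:
--         return f"first live lane: {base}/{quote} is currently the cleanest expression"
--
--     parts = []
--     prior_same_pair = [item for item in prior if str(item.get("pair", "")) == pair]
--     if prior_same_pair:
--         parts.append(
--             f"same pair is allowed here because `{seat_family}` is a separate trigger/vehicle, not blind averaging"
--         )
--     if all(PAIR_CURRENCIES.get(str(item.get("pair", "")), ("?", "?"))[0] != base for item in prior):
--         parts.append(f"new base currency {base}")
--     if all(str(item.get("bucket", "other")) != str(profile.get("bucket", "other")) for item in prior):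
--         parts.append(f"new vehicle bucket {profile.get('bucket')}")
--     if not parts:
--         other_pairs = ", ".join(str(item.get("pair", "")) for item in prior[:2])
--         parts.append(f"separate expression from {other_pairs}")
--     return " + ".join(parts)
-- ===== SOURCE B (Python) =====
-- PAIR_CURRENCIES = {
--     "USD_JPY": ("USD", "JPY"),
--     "EUR_USD": ("EUR", "USD"),
--     "GBP_USD": ("GBP", "USD"),
--     "AUD_USD": ("AUD", "USD"),
--     "EUR_JPY": ("EUR", "JPY"),
--     "GBP_JPY": ("GBP", "JPY"),
--     "AUD_JPY": ("AUD", "JPY"),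
-- }
--
-- def _multi_vehicle_reason(profile: dict, prior: list) -> str:
--     pair = str(profile.get("pair", ""))
--     base, quote = PAIR_CURRENCIES.get(pair, ("?", "?"))
--     seat_family = str(profile.get("seat_family") or "seat")
--     if not prior:
--         return f"first live lane: {base}/{quote} is currently the cleanest expression"
--
--     bucket = str(profile.get("bucket", "other"))
--     same_pair_seen = base_collision = bucket_collision = False
--     first_two = []
--     for item in prior:
--         p = str(item.get("pair", ""))
--         if len(first_two) < 2:
--             first_two.append(p)
--         if p == pair:
--             same_pair_seen = True
--         if PAIR_CURRENCIES.get(p, ("?", "?"))[0] == base: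
--             base_collision = True
--         if str(item.get("bucket", "other")) == bucket:
--             bucket_collision = True
--
--     parts = []
--     if same_pair_seen:
--         parts.append(
--             f"same pair is allowed here because `{seat_family}` is a separate trigger/vehicle, not blind averaging"
--         )
--     if not base_collision:
--         parts.append(f"new base currency {base}")
--     if not bucket_collision:
--         parts.append(f"new vehicle bucket {profile.get('bucket')}")
--     if not parts:
--         parts.append("separate expression from " + ", ".join(first_two))
--     return " + ".join(parts)
-- ===== Notes on version B (the rewrite author's own statement) =====
-- stated objective: alternative
-- what changed: Replaces A's three separate scans of prior (a filter plus two all() generator passes) and the prior[:2] slice with one loop maintaining three boolean flags and capturing the first two pair strings, then assembles the same parts afterwards.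
import Mathlib
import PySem

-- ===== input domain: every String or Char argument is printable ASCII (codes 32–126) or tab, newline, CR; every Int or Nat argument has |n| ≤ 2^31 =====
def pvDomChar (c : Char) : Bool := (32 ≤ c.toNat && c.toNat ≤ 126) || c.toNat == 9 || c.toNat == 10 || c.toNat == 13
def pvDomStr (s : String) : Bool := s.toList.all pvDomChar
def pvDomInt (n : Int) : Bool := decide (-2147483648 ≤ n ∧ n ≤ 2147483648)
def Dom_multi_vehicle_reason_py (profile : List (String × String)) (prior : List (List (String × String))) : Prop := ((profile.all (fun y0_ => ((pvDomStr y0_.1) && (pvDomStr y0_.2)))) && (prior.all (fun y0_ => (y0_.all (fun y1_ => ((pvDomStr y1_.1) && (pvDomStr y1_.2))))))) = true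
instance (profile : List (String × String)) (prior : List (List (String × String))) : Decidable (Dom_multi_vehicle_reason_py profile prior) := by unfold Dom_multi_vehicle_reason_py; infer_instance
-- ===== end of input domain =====

-- B replaces A's three separate scans of `prior` (filter + two all() passes) and the prior[:2]
-- slice with one loop over `prior` maintaining three flags and the first two pair strings (alternative decomposition).


-- ===== PORT A =====
-- PAIR_CURRENCIES (module constant); dict.get ported as first-match association-list lookup
def pvPC : List (String × (String × String)) :=
  [("USD_JPY", ("USD", "JPY")), ("EUR_USD", ("EUR", "USD")), ("GBP_USD", ("GBP", "USD")),
   ("AUD_USD", ("AUD", "USD")), ("EUR_JPY", ("EUR", "JPY")), ("GBP_JPY", ("GBP", "JPY")),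
   ("AUD_JPY", ("AUD", "JPY"))]

-- d.get(k) on an association list: first match  (exact: dict lookup, convention first match)
def pvGet (d : List (String × String)) (k : String) : Option String :=
  (d.find? (fun p => p.1 == k)).map (fun p => p.2)

-- PAIR_CURRENCIES.get(pair, ("?", "?"))
def pvPCget (pair : String) : String × String :=
  ((pvPC.find? (fun p => p.1 == pair)).map (fun p => p.2)).getD ("?", "?")

-- str(profile.get("seat_family") or "seat")  (missing key or empty string falls back to "seat")
def pvSeatFamily (profile : List (String × String)) : String :=
  match pvGet profile "seat_family" with
  | none => "seat"
  | some s => if s == "" then "seat" else s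

def multi_vehicle_reason_py (profile : List (String × String)) (prior : List (List (String × String))) : String :=
  let pair := (pvGet profile "pair").getD ""
  let bq := pvPCget pair
  let base := bq.1
  let quote := bq.2
  let seat_family := pvSeatFamily profile
  if prior.isEmpty then
    "first live lane: " ++ base ++ "/" ++ quote ++ " is currently the cleanest expression"
  else
    let parts : List String := []
    let prior_same_pair := prior.filter (fun item => (pvGet item "pair").getD "" == pair)
    let parts := if !prior_same_pair.isEmpty then
        parts ++ ["same pair is allowed here because `" ++ seat_family ++ "` is a separate trigger/vehicle, not blind averaging"]
      else parts
    let parts := if prior.all (fun item => (pvPCget ((pvGet item "pair").getD "")).1 != base) then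
        parts ++ ["new base currency " ++ base]
      else parts
    let parts := if prior.all (fun item => (pvGet item "bucket").getD "other" != (pvGet profile "bucket").getD "other") then
        parts ++ ["new vehicle bucket " ++ ((pvGet profile "bucket").getD "None")]
      else parts
    let parts := if parts.isEmpty then
        ["separate expression from " ++ PySem.Str.join ", " ((PySem.List.slice prior (some 0) (some 2)).map (fun item => (pvGet item "pair").getD ""))]
      else parts
    PySem.Str.join " + " parts

-- ===== PORT B =====
-- the single for-loop of B: flags (same_pair_seen, base_collision, bucket_collision) and first_two
def pvScan (pair base bucket : String) : List (List (String × String)) → Bool → Bool → Bool → List String → Bool × Bool × Bool × List String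
  | [], s, b, k, ft => (s, b, k, ft)
  | item :: rest, s, b, k, ft =>
      let p := (pvGet item "pair").getD ""
      let ft := if ft.length < 2 then ft ++ [p] else ft
      pvScan pair base bucket rest (s || p == pair) (b || (pvPCget p).1 == base)
        (k || (pvGet item "bucket").getD "other" == bucket) ft

def multi_vehicle_reason_py_alt (profile : List (String × String)) (prior : List (List (String × String))) : String :=
  let pair := (pvGet profile "pair").getD ""
  let bq := pvPCget pair
  let base := bq.1
  let quote := bq.2
  let seat_family := pvSeatFamily profile
  match prior with
  | [] => "first live lane: " ++ base ++ "/" ++ quote ++ " is currently the cleanest expression"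
  | _ =>
    let bucket := (pvGet profile "bucket").getD "other"
    let r := pvScan pair base bucket prior false false false []
    let parts : List String :=
      (if r.1 then ["same pair is allowed here because `" ++ seat_family ++ "` is a separate trigger/vehicle, not blind averaging"] else [])
      ++ (if r.2.1 then [] else ["new base currency " ++ base])
      ++ (if r.2.2.1 then [] else ["new vehicle bucket " ++ ((pvGet profile "bucket").getD "None")])
    let parts := if parts.isEmpty then
        ["separate expression from " ++ PySem.Str.join ", " r.2.2.2]
      else parts
    PySem.Str.join " + " parts

-- ===== PRECONDITION & SPEC =====
def Spec_multi_vehicle_reason_py (profile : List (String × String)) (prior : List (List (String × String))) (out : String) : Prop := out = multi_vehicle_reason_py_alt profile prior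
instance (profile : List (String × String)) (prior : List (List (String × String))) (out : String) : Decidable (Spec_multi_vehicle_reason_py profile prior out) := by unfold Spec_multi_vehicle_reason_py; infer_instance

-- ===== CLAIM (what is proved, stated in full; the proofs are below) =====
def Claim_equal_multi_vehicle_reason_py : Prop := ∀ (profile : List (String × String)) (prior : List (List (String × String))), Dom_multi_vehicle_reason_py profile prior → Spec_multi_vehicle_reason_py profile prior (multi_vehicle_reason_py profile prior)

-- ===== LEMMAS AND PROOFS =====

-- the single pass computes the three any-flags and the first two pair strings
theorem pvScan_eq (pair base bucket : String) (prior : List (List (String × String)))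
    (s b k : Bool) (ft : List String) :
    pvScan pair base bucket prior s b k ft =
      (s || prior.any (fun item => (pvGet item "pair").getD "" == pair),
       b || prior.any (fun item => (pvPCget ((pvGet item "pair").getD "")).1 == base),
       k || prior.any (fun item => (pvGet item "bucket").getD "other" == bucket),
       ft ++ (prior.map (fun item => (pvGet item "pair").getD "")).take (2 - ft.length)) := by
  induction prior generalizing s b k ft with
  | nil => simp [pvScan]
  | cons item rest ih =>
    simp only [pvScan, ih, List.any_cons, List.map_cons]
    by_cases h : ft.length < 2
    · have h2 : 2 - ft.length = (2 - (ft.length + 1)) + 1 := by omega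
      simp [h, h2, Bool.or_assoc, List.take_succ_cons]
    · have h0 : 2 - ft.length = 0 := by omega
      have h1 : 2 - (ft.length + 1) = 0 := by omega
      simp [h, h0, Bool.or_assoc]

theorem pv_all_ne_eq_not_any {α : Type} (l : List α) (f : α → Bool) :
    l.all (fun x => !f x) = !l.any f := by
  induction l with
  | nil => rfl
  | cons x xs ih => simp [ih]

theorem pv_filter_isEmpty {α : Type} (l : List α) (p : α → Bool) :
    (l.filter p).isEmpty = !l.any p := by
  induction l with
  | nil => rfl
  | cons x xs ih =>
    by_cases h : p x = true <;> simp [h, ih]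

theorem pv_slice_take (prior : List (List (String × String))) :
    PySem.List.slice prior (some 0) (some 2) = prior.take 2 := by
  simp only [PySem.List.slice_zero_start]
  rw [PySem.List.slice_to prior (by omega : (0:Int) ≤ 2)]
  rfl

-- ===== VERDICT (by name: the statement is the Claim_ definition above) =====
theorem multi_vehicle_reason_py_spec : Claim_equal_multi_vehicle_reason_py := by
  intro profile prior _
  unfold Spec_multi_vehicle_reason_py multi_vehicle_reason_py multi_vehicle_reason_py_alt
  cases prior with
  | nil => rfl
  | cons h t =>
    simp only [List.isEmpty_cons, if_neg Bool.false_ne_true, pvScan_eq, Bool.false_or,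
      List.length_nil, Nat.sub_zero, List.nil_append, pv_slice_take, List.map_take]
    have e1 : ((h :: t).filter (fun item => (pvGet item "pair").getD "" == (pvGet profile "pair").getD "")).isEmpty
        = !(h :: t).any (fun item => (pvGet item "pair").getD "" == (pvGet profile "pair").getD "") :=
      pv_filter_isEmpty _ _
    have e2 : (h :: t).all (fun item => (pvPCget ((pvGet item "pair").getD "")).1 != (pvPCget ((pvGet profile "pair").getD "")).1)
        = !(h :: t).any (fun item => (pvPCget ((pvGet item "pair").getD "")).1 == (pvPCget ((pvGet profile "pair").getD "")).1) :=
      pv_all_ne_eq_not_any _ _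
    have e3 : (h :: t).all (fun item => (pvGet item "bucket").getD "other" != (pvGet profile "bucket").getD "other")
        = !(h :: t).any (fun item => (pvGet item "bucket").getD "other" == (pvGet profile "bucket").getD "other") :=
      pv_all_ne_eq_not_any _ _
    rw [e1, e2, e3]
    cases (h :: t).any (fun item => (pvGet item "pair").getD "" == (pvGet profile "pair").getD "") <;>
    cases (h :: t).any (fun item => (pvPCget ((pvGet item "pair").getD "")).1 == (pvPCget ((pvGet profile "pair").getD "")).1) <;>
    cases (h :: t).any (fun item => (pvGet item "bucket").getD "other" == (pvGet profile "bucket").getD "other") <;> rfl
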